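-- pv_equiv track=rewrite | github.com/rather-not-work-on/platform-planningops | planningops/scripts/core/loop/runner.py | derive_no_eligible_reason
-- ===== SOURCE A (Python) =====
-- def derive_no_eligible_reason(candidates, selection_attempts, closed_issue_reconcile):
--     if not candidates:
--         return {
--             "reason_code": "no_candidate_project_items",
--             "recommended_action": "retriage_backlog",
--         }
--
--     attempt_results = [str(attempt.get("result") or "").strip() for attempt in selection_attempts if attempt.get("result")]
--     if (
--         closed_issue_reconcile.get("issues_total", 0) > 0
--         and attempt_results
--         and all(result == "issue_not_open" for result in attempt_results)
--     ):
--         return {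
--             "reason_code": "closed_issue_project_drift",
--             "recommended_action": "rerun_apply_closed_issue_reconcile",
--         }
--     if attempt_results and all(result == "dependency_blocked" for result in attempt_results):
--         return {
--             "reason_code": "dependency_blocked",
--             "recommended_action": "wait_for_dependencies",
--         }
--     if attempt_results and all(result == "inventory_only" for result in attempt_results):
--         return {
--             "reason_code": "inventory_only_candidates_only",
--             "recommended_action": "promote_executable_backlog",
--         }
--     return {
--         "reason_code": "no_eligible_todo_issue",
--         "recommended_action": "retriage_backlog",
--     }
-- ===== SOURCE B (Python) =====
-- _UNIFORM_TABLE = {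
--     "dependency_blocked": {
--         "reason_code": "dependency_blocked",
--         "recommended_action": "wait_for_dependencies",
--     },
--     "inventory_only": {
--         "reason_code": "inventory_only_candidates_only",
--         "recommended_action": "promote_executable_backlog",
--     },
-- }
--
--
-- def derive_no_eligible_reason(candidates, selection_attempts, closed_issue_reconcile):
--     if not candidates:
--         return {
--             "reason_code": "no_candidate_project_items",
--             "recommended_action": "retriage_backlog",
--         }
--     # One forward pass: remember the first non-empty result and whether any
--     # later one disagrees with it; never materialize the results list.
--     uniform = None
--     mixed = False
--     for attempt in selection_attempts:
--         raw = attempt.get("result")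
--         if raw:
--             value = str(raw).strip()
--             if uniform is None:
--                 uniform = value
--             elif value != uniform:
--                 mixed = True
--     if uniform is not None and not mixed:
--         if uniform == "issue_not_open":
--             if closed_issue_reconcile.get("issues_total", 0) > 0:
--                 return {
--                     "reason_code": "closed_issue_project_drift",
--                     "recommended_action": "rerun_apply_closed_issue_reconcile",
--                 }
--         else:
--             hit = _UNIFORM_TABLE.get(uniform)
--             if hit is not None:
--                 return dict(hit)
--     return {
--         "reason_code": "no_eligible_todo_issue",
--         "recommended_action": "retriage_backlog",
--     }
-- ===== Notes on version B (the rewrite author's own statement) =====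
-- stated objective: alternative
-- what changed: Instead of materializing the attempt_results list and running three separate all(...) scans, B makes a single forward pass keeping a (first non-empty result, mixed?) accumulator and classifies the uniform value via a static lookup table.
import Mathlib
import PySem

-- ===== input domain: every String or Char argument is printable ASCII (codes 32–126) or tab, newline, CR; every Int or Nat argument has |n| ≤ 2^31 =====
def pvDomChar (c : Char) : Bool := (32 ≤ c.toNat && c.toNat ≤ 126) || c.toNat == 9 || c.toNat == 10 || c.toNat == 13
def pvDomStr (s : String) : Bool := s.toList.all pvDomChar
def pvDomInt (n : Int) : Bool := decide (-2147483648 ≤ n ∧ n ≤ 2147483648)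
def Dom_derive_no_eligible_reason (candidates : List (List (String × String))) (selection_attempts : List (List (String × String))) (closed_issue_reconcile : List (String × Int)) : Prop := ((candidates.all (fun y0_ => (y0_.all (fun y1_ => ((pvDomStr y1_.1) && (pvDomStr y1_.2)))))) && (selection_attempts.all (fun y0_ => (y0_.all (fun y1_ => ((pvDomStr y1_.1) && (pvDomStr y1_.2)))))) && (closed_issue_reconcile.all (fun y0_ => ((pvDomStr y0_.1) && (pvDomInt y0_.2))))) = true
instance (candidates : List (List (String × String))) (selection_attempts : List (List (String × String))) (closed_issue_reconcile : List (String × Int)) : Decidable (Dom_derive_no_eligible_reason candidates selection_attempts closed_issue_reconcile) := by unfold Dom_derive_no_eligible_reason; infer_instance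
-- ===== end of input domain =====

-- B replaces A's materialized attempt_results list and its three all(...) scans by one
-- forward pass keeping a (first result, mixed?) accumulator plus a static lookup table
-- (objective: alternative).

-- ===== PORT A =====
def derive_no_eligible_reason (candidates : List (List (String × String))) (selection_attempts : List (List (String × String))) (closed_issue_reconcile : List (String × Int)) : List (String × String) :=
  if candidates.isEmpty then
    [("reason_code", "no_candidate_project_items"), ("recommended_action", "retriage_backlog")]
  else
    let attempt_results : List String :=
      (selection_attempts.filter
          (fun a => ((PySem.Dict.get? (PySem.Dict.mk a) "result").getD "") != "")).map
        (fun a => PySem.Str.strip ((PySem.Dict.get? (PySem.Dict.mk a) "result").getD ""))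
    if decide (0 < PySem.Dict.getD (PySem.Dict.mk closed_issue_reconcile) "issues_total" 0) &&
        (!attempt_results.isEmpty && attempt_results.all (fun r => r == "issue_not_open")) then
      [("reason_code", "closed_issue_project_drift"), ("recommended_action", "rerun_apply_closed_issue_reconcile")]
    else if !attempt_results.isEmpty && attempt_results.all (fun r => r == "dependency_blocked") then
      [("reason_code", "dependency_blocked"), ("recommended_action", "wait_for_dependencies")]
    else if !attempt_results.isEmpty && attempt_results.all (fun r => r == "inventory_only") then
      [("reason_code", "inventory_only_candidates_only"), ("recommended_action", "promote_executable_backlog")]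
    else
      [("reason_code", "no_eligible_todo_issue"), ("recommended_action", "retriage_backlog")]

-- ===== PORT B =====
-- fold step of B's single pass over an already-extracted result value
def pvStep (st : Option String × Bool) (v : String) : Option String × Bool :=
  match st with
  | (none, m) => (some v, m)
  | (some u, m) => (some u, m || (v != u))

-- one step of B's loop over an attempt dict: extract, test truthiness, feed pvStep
def pvScan (st : Option String × Bool) (a : List (String × String)) : Option String × Bool :=
  let raw := (PySem.Dict.get? (PySem.Dict.mk a) "result").getD ""
  if raw != "" then pvStep st (PySem.Str.strip raw) else st

-- B's static table _UNIFORM_TABLE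
def pvUniformTable : PySem.Dict String (List (String × String)) :=
  PySem.Dict.mk
    [("dependency_blocked",
        [("reason_code", "dependency_blocked"), ("recommended_action", "wait_for_dependencies")]),
     ("inventory_only",
        [("reason_code", "inventory_only_candidates_only"), ("recommended_action", "promote_executable_backlog")])]

def derive_no_eligible_reason_alt (candidates : List (List (String × String))) (selection_attempts : List (List (String × String))) (closed_issue_reconcile : List (String × Int)) : List (String × String) :=
  if candidates.isEmpty then
    [("reason_code", "no_candidate_project_items"), ("recommended_action", "retriage_backlog")]
  else
    let st : Option String × Bool := selection_attempts.foldl pvScan (none, false)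
    match st with
    | (some u, false) =>
      if u == "issue_not_open" then
        if decide (0 < PySem.Dict.getD (PySem.Dict.mk closed_issue_reconcile) "issues_total" 0) then
          [("reason_code", "closed_issue_project_drift"), ("recommended_action", "rerun_apply_closed_issue_reconcile")]
        else
          [("reason_code", "no_eligible_todo_issue"), ("recommended_action", "retriage_backlog")]
      else
        match PySem.Dict.get? pvUniformTable u with
        | some out => out
        | none => [("reason_code", "no_eligible_todo_issue"), ("recommended_action", "retriage_backlog")]
    | _ => [("reason_code", "no_eligible_todo_issue"), ("recommended_action", "retriage_backlog")]

-- ===== PRECONDITION & SPEC =====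
def Spec_derive_no_eligible_reason (candidates : List (List (String × String))) (selection_attempts : List (List (String × String))) (closed_issue_reconcile : List (String × Int)) (out : List (String × String)) : Prop := out = derive_no_eligible_reason_alt candidates selection_attempts closed_issue_reconcile
instance (candidates : List (List (String × String))) (selection_attempts : List (List (String × String))) (closed_issue_reconcile : List (String × Int)) (out : List (String × String)) : Decidable (Spec_derive_no_eligible_reason candidates selection_attempts closed_issue_reconcile out) := by unfold Spec_derive_no_eligible_reason; infer_instance

-- ===== CLAIM (what is proved, stated in full; the proofs are below) =====
def Claim_equal_derive_no_eligible_reason : Prop := ∀ (candidates : List (List (String × String))) (selection_attempts : List (List (String × String))) (closed_issue_reconcile : List (String × Int)), Dom_derive_no_eligible_reason candidates selection_attempts closed_issue_reconcile → Spec_derive_no_eligible_reason candidates selection_attempts closed_issue_reconcile (derive_no_eligible_reason candidates selection_attempts closed_issue_reconcile)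

-- ===== LEMMAS AND PROOFS =====

-- B's interleaved fold over attempts equals pvStep folded over A's filtered/mapped result list.
lemma fold_attempts_eq (attempts : List (List (String × String))) (st : Option String × Bool) :
    attempts.foldl pvScan st
  = ((attempts.filter
        (fun a => ((PySem.Dict.get? (PySem.Dict.mk a) "result").getD "") != "")).map
      (fun a => PySem.Str.strip ((PySem.Dict.get? (PySem.Dict.mk a) "result").getD ""))).foldl pvStep st := by
  induction attempts generalizing st with
  | nil => rfl
  | cons a t ih =>
    simp only [List.foldl_cons, List.filter_cons]
    by_cases h : ((PySem.Dict.get? (PySem.Dict.mk a) "result").getD "") = ""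
    · simp only [pvScan, h]
      simp [ih]
    · have hb : (!((PySem.Dict.get? (PySem.Dict.mk a) "result").getD "" == "")) = true := by
        simp [h]
      simp only [pvScan, bne]
      rw [if_pos hb, if_pos hb, List.map_cons, List.foldl_cons]
      simpa [bne] using ih _

-- once the first value is fixed, the fold just accumulates the "mixed" flag
lemma foldl_pvStep_some (xs : List String) (u : String) (m : Bool) :
    xs.foldl pvStep (some u, m) = (some u, m || xs.any (fun v => v != u)) := by
  induction xs generalizing m with
  | nil => simp
  | cons x t ih => simp [List.foldl_cons, pvStep, ih, Bool.or_assoc]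

lemma foldl_pvStep_cons (x : String) (xs : List String) :
    (x :: xs).foldl pvStep (none, false) = (some x, xs.any (fun v => v != x)) := by
  simp [List.foldl_cons, pvStep, foldl_pvStep_some]

-- any (≠ x) is the negation of all (= x)
lemma any_ne_eq_not_all (xs : List String) (x : String) :
    xs.any (fun v => v != x) = !xs.all (fun v => v == x) := by
  induction xs with
  | nil => rfl
  | cons a t ih =>
    have ih' : (t.any fun v => !(v == x)) = !t.all fun v => v == x := by
      simpa [bne] using ih
    simp [List.any_cons, List.all_cons, Bool.not_and, bne, ih']

-- ===== VERDICT (by name: the statement is the Claim_ definition above) =====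
theorem derive_no_eligible_reason_spec : Claim_equal_derive_no_eligible_reason := by
  intro candidates selection_attempts closed_issue_reconcile _
  unfold Spec_derive_no_eligible_reason derive_no_eligible_reason derive_no_eligible_reason_alt
  by_cases hc : candidates.isEmpty
  · simp [hc]
  · simp only [hc, if_false, Bool.false_eq_true]
    rw [fold_attempts_eq]
    set rs := ((selection_attempts.filter
        (fun a => ((PySem.Dict.get? (PySem.Dict.mk a) "result").getD "") != "")).map
      (fun a => PySem.Str.strip ((PySem.Dict.get? (PySem.Dict.mk a) "result").getD ""))) with hrs
    clear hrs
    cases rs with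
    | nil => simp
    | cons x xs =>
      rw [foldl_pvStep_cons, any_ne_eq_not_all]
      by_cases hall : xs.all (fun v => v == x) = true
      · -- uniform: every later value equals the first
        simp only [hall, Bool.not_true]
        by_cases h1 : x = "issue_not_open"
        · subst h1
          by_cases hit : (0 : Int) < PySem.Dict.getD (PySem.Dict.mk closed_issue_reconcile) "issues_total" 0
          · simp [hit, hall]
          · simp [hit, hall, List.all_cons]
        · by_cases h2 : x = "dependency_blocked"
          · subst h2
            simp [hall, pvUniformTable, PySem.Dict.get?]
          · by_cases h3 : x = "inventory_only"
            · subst h3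
              simp [hall, pvUniformTable, PySem.Dict.get?]
            · have b1 : (x == "issue_not_open") = false := by simpa using h1
              have b2 : (x == "dependency_blocked") = false := by simpa using h2
              have b3 : (x == "inventory_only") = false := by simpa using h3
              have b2' : (("dependency_blocked" : String) == x) = false := by
                cases hq : (("dependency_blocked" : String) == x) with
                | false => rfl
                | true => exact absurd (eq_of_beq hq).symm h2
              have b3' : (("inventory_only" : String) == x) = false := by
                cases hq : (("inventory_only" : String) == x) with
                | false => rfl
                | true => exact absurd (eq_of_beq hq).symm h3
              simp [b1, b2, b3, b2', b3', pvUniformTable, PySem.Dict.get?, List.find?]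
      · -- mixed: every branch of A is false, B hits the default arm
        simp only [Bool.not_eq_true] at hall
        simp only [hall, Bool.not_false]
        have falseX : ∀ X : String, ((x :: xs).all (fun v => v == X)) = true → xs.all (fun v => v == x) = true := by
          intro X h
          rw [List.all_cons, Bool.and_eq_true] at h
          obtain ⟨hx, hxs⟩ := h
          have := eq_of_beq hx
          subst this
          exact hxs
        have c1 : ((x :: xs).all (fun v => v == "issue_not_open")) = false := by
          cases h : (x :: xs).all (fun v => v == "issue_not_open") with
          | false => rfl
          | true => exact absurd (falseX _ h) (by simp [hall])
        have c2 : ((x :: xs).all (fun v => v == "dependency_blocked")) = false := by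
          cases h : (x :: xs).all (fun v => v == "dependency_blocked") with
          | false => rfl
          | true => exact absurd (falseX _ h) (by simp [hall])
        have c3 : ((x :: xs).all (fun v => v == "inventory_only")) = false := by
          cases h : (x :: xs).all (fun v => v == "inventory_only") with
          | false => rfl
          | true => exact absurd (falseX _ h) (by simp [hall])
        simp [c1, c2, c3]
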